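-- pv_equiv track=rewrite | github.com/kelly-chui/problem-solving | Python/Programmers/양과 늑대.py | solution
-- ===== SOURCE A (Python) =====
-- def dfs(currentNode, tree, info, visitedNodes, sheepCount, wolfCount):
--     if info[currentNode] == 0:
--         sheepCount += 1
--     else:
--         wolfCount += 1
--     if sheepCount <= wolfCount:
--         return 0
--     answer = sheepCount
--     for visitedNode in list(visitedNodes):
--         for neighborNode in tree.get(visitedNode, []):
--             if neighborNode in visitedNodes:
--                 continue
--             visitedNodes.add(neighborNode)
--             answer = max(answer, dfs(neighborNode, tree, info, visitedNodes, sheepCount, wolfCount))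
--             visitedNodes.remove(neighborNode)
--     return answer
--
-- def solution(info, edges):
--     tree = {}
--     for idx in range(0, len(info)):
--         tree[idx] = []
--     for parent, child in edges:
--         tree[parent].append(child)
--     visitedNodes = set([0])
--     answer = dfs(0, tree, info, visitedNodes, 0, 0)
--     return answer
-- ===== SOURCE B (Python) =====
-- def insort(st, c):
--     # insert c into the sorted tuple st, keeping it sorted (canonical state key)
--     out = []
--     placed = False
--     for v in st:
--         if not placed and c < v:
--             out.append(c)
--             placed = True
--         out.append(v)
--     if not placed:
--         out.append(c)
--     return tuple(out)
--
--
-- def solution(info, edges):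
--     n = len(info)
--     children = {idx: [] for idx in range(n)}
--     for p, c in edges:
--         children[p].append(c)
--     if info[0] != 0:
--         return 0
--     best = 1
--     level = {(0,): (1, 0)}
--     for _ in range(1, n):
--         nxt = {}
--         for st, (s, w) in level.items():
--             for v in st:
--                 for c in children.get(v, ()):
--                     if c in st:
--                         continue
--                     ns = insort(st, c)
--                     if ns in nxt:
--                         continue
--                     if info[c] == 0:
--                         ns_s, ns_w = s + 1, w
--                     else:
--                         ns_s, ns_w = s, w + 1
--                     if ns_s > ns_w:
--                         nxt[ns] = (ns_s, ns_w)
--                         if ns_s > best: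
--                             best = ns_s
--         level = nxt
--     return best
-- ===== Notes on version B (the rewrite author's own statement) =====
-- stated objective: alternative
-- what changed: A re-runs its recursive DFS for every ordering in which the visited vertex set can be grown; B replaces that with a level-by-level BFS over canonical visited-set states, deduplicated per level in a dictionary, so each reachable safe subset is expanded once per level instead of once per growth ordering.
-- outside the precondition, e.g. on solution([0, 0], [(0, 1), (0, -1)]): A returns 3, B returns 2; on solution([0, 0], [(0, -1)]): A returns 2, B returns 2
import Mathlib
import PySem

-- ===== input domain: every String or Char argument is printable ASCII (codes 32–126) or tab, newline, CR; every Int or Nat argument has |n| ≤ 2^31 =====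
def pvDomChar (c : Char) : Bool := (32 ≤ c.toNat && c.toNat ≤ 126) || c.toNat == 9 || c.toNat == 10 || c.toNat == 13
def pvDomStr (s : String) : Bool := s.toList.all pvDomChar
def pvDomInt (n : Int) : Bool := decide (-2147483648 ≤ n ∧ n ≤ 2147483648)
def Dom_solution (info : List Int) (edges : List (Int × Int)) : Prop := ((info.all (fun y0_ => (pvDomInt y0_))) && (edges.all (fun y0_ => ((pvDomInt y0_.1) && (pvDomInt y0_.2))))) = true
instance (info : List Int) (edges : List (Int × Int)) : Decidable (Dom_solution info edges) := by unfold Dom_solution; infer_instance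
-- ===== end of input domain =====

-- B replaces A's recursion over every growth ORDERING of the visited set by a level-by-level
-- BFS over canonical visited-set STATES, deduplicated per level (each safe subset expanded
-- once per level). Equality of the RETURN value is claimed on Pre_; A mutates no argument.

-- ===== PORT A =====
-- info[x] (shared getter; exact for in-range and negative in-range indices, Pre_ excludes the rest)
def pvInfoAt (info : List Int) (v : Int) : Int := (PySem.List.pyGet? info v).getD 0

-- tree.get(v, []) lookup
def pvTreeGet (tree : PySem.Dict Int (List Int)) (v : Int) : List Int := tree.getD v []

-- dfs(currentNode, tree, info, visitedNodes, sheepCount, wolfCount); fuel only makes the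
-- recursion structural (edges.length + 1 always suffices: each call visits a fresh child node)
def pvDfs (tree : PySem.Dict Int (List Int)) (info : List Int) :
    Nat → Int → PySem.Set Int → Int → Int → Int
  | 0, _, _, _, _ => 0
  | fuel + 1, currentNode, visitedNodes, sheepCount, wolfCount =>
    let s := if pvInfoAt info currentNode = 0 then sheepCount + 1 else sheepCount
    let w := if pvInfoAt info currentNode = 0 then wolfCount else wolfCount + 1
    if s ≤ w then 0
    else
      visitedNodes.foldl (fun answer visitedNode =>
        (pvTreeGet tree visitedNode).foldl (fun answer neighborNode =>
          if visitedNodes.contains neighborNode then answer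
          else max answer
            (pvDfs tree info fuel neighborNode (PySem.Set.add visitedNodes neighborNode) s w))
          answer) s

def solution (info : List Int) (edges : List (Int × Int)) : Int :=
  let tree0 : PySem.Dict Int (List Int) :=
    (PySem.List.pyRange 0 (PySem.List.len info) 1).foldl
      (fun d idx => d.insert idx []) PySem.Dict.empty
  -- tree[parent].append(child)  (modify: in-place append; the KeyError case is outside Pre_)
  let tree := edges.foldl (fun d pc => d.modify pc.1 [] (· ++ [pc.2])) tree0
  let visitedNodes : PySem.Set Int := PySem.Set.ofList [0]
  pvDfs tree info (edges.length + 1) 0 visitedNodes 0 0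

-- ===== PORT B =====
-- insort(st, c): c inserted into the sorted state tuple st
def pvInsort (c : Int) : List Int → List Int
  | [] => [c]
  | v :: rest => if c < v then c :: v :: rest else v :: pvInsort c rest

-- innermost loop body of B: try to extend state st (counts s, w) by child c
def pvIns (info : List Int) (st : List Int) (s w : Int)
    (b : Int × PySem.Dict (List Int) (Int × Int)) (c : Int) :
    Int × PySem.Dict (List Int) (Int × Int) :=
  if st.contains c then b
  else
    let ns := pvInsort c st
    if b.2.contains ns then b
    else
      let s' := if pvInfoAt info c = 0 then s + 1 else s
      let w' := if pvInfoAt info c = 0 then w else w + 1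
      if w' < s' then (max b.1 s', b.2.insert ns (s', w')) else b

-- one level-expansion round: (best, level) ↦ (best', next level dict)
def pvStep (info : List Int) (children : PySem.Dict Int (List Int))
    (acc : Int × PySem.Dict (List Int) (Int × Int)) :
    Int × PySem.Dict (List Int) (Int × Int) :=
  acc.2.items.foldl (fun b item =>
    item.1.foldl (fun b v =>
      (children.getD v []).foldl (pvIns info item.1 item.2.1 item.2.2) b) b)
    (acc.1, PySem.Dict.empty)

def solution_alt (info : List Int) (edges : List (Int × Int)) : Int :=
  -- children = {idx: [] for idx in range(n)}; children[p].append(c)  (KeyError outside Pre_)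
  let children0 : PySem.Dict Int (List Int) :=
    (PySem.List.pyRange 0 (PySem.List.len info) 1).foldl
      (fun d idx => d.insert idx []) PySem.Dict.empty
  let children := edges.foldl (fun d pc => d.modify pc.1 [] (· ++ [pc.2])) children0
  if pvInfoAt info 0 ≠ 0 then 0
  else
    let init : Int × PySem.Dict (List Int) (Int × Int) :=
      (1, PySem.Dict.empty.insert [0] (1, 0))
    ((PySem.List.pyRange 1 (PySem.List.len info) 1).foldl
      (fun acc _ => pvStep info children acc) init).1

-- ===== PRECONDITION & SPEC =====
-- Pre_ restricts to the problem's natural domain (a nonempty node list, every edge endpoint a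
-- valid node index): outside it A raises KeyError/IndexError, or — for negative child ids —
-- silently reads info[] by Python's negative-index wraparound, which Pre_ also excludes as
-- malformed input (see claim cites).
def Pre_solution (info : List Int) (edges : List (Int × Int)) : Prop :=
  info ≠ [] ∧ ∀ pc ∈ edges, 0 ≤ pc.1 ∧ pc.1 < info.length ∧ 0 ≤ pc.2 ∧ pc.2 < info.length
instance (info : List Int) (edges : List (Int × Int)) : Decidable (Pre_solution info edges) := by
  unfold Pre_solution; infer_instance
def pvWitness_solution : List Int × (List (Int × Int)) := ([0, 0, 1], [(0, 1), (0, 2)])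

def Spec_solution (info : List Int) (edges : List (Int × Int)) (out : Int) : Prop :=
  out = solution_alt info edges
instance (info : List Int) (edges : List (Int × Int)) (out : Int) :
    Decidable (Spec_solution info edges out) := by unfold Spec_solution; infer_instance

-- ===== CLAIM (what is proved, stated in full; the proofs are below) =====
def Claim_equal_solution : Prop := ∀ (info : List Int) (edges : List (Int × Int)),
  Dom_solution info edges → Pre_solution info edges → Spec_solution info edges (solution info edges)

-- ===== LEMMAS AND PROOFS =====
-- ===== LEMMAS AND PROOFS =====

-- generic fold plumbing
theorem pvFoldInfl {α : Type} {step : Int → α → Int} (h : ∀ a x, a ≤ step a x) :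
    ∀ (l : List α) (a : Int), a ≤ l.foldl step a := by
  intro l
  induction l with
  | nil => intro a; simp
  | cons x t ih => intro a; exact le_trans (h a x) (ih (step a x))

theorem pvFoldReach {α : Type} {step : Int → α → Int} (h : ∀ a x, a ≤ step a x)
    {l : List α} {x : α} (hx : x ∈ l) {t : Int} (ht : ∀ a, t ≤ step a x) :
    ∀ a, t ≤ l.foldl step a := by
  induction l with
  | nil => cases hx
  | cons y ys ih =>
    intro a
    rcases List.mem_cons.mp hx with rfl | hmem
    · exact le_trans (ht a) (pvFoldInfl h ys _)
    · exact ih hmem (step a y)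

theorem pvFoldCases {α : Type} {step : Int → α → Int} (W : α → Int → Prop)
    (h : ∀ a x, step a x = a ∨ W x (step a x)) :
    ∀ (l : List α) (a : Int), l.foldl step a = a ∨ ∃ x ∈ l, W x (l.foldl step a) := by
  intro l
  induction l with
  | nil => intro a; left; rfl
  | cons y ys ih =>
    intro a
    rcases ih (step a y) with h1 | ⟨x, hx, hw⟩
    · rw [List.foldl_cons, h1]
      rcases h a y with h2 | h2
      · left; exact h2
      · right; exact ⟨y, List.mem_cons_self, h2⟩
    · right; exact ⟨x, List.mem_cons_of_mem _ hx, hw⟩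

theorem pvFoldPres {σ α : Type} {step : σ → α → σ} {P : σ → Prop} {l : List α}
    (h : ∀ s x, x ∈ l → P s → P (step s x)) : ∀ s, P s → P (l.foldl step s) := by
  induction l with
  | nil => intro s hs; exact hs
  | cons y ys ih =>
    intro s hs
    exact ih (fun s x hx hp => h s x (List.mem_cons_of_mem _ hx) hp) _
      (h s y List.mem_cons_self hs)

theorem pvFoldEst {σ α : Type} {step : σ → α → σ} {P : σ → Prop} {l : List α}
    (h : ∀ s x, x ∈ l → P s → P (step s x)) {x : α} (hx : x ∈ l) (hest : ∀ s, P (step s x)) :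
    ∀ s, P (l.foldl step s) := by
  induction l with
  | nil => cases hx
  | cons y ys ih =>
    intro s
    rcases List.mem_cons.mp hx with rfl | hmem
    · exact pvFoldPres (fun s x hx' hp => h s x (List.mem_cons_of_mem _ hx') hp) _ (hest s)
    · exact ih (fun s x hx' hp => h s x (List.mem_cons_of_mem _ hx') hp) hmem _

-- abstract data
def pvChildList (edges : List (Int × Int)) (v : Int) : List Int :=
  (edges.filter (fun pc => pc.1 == v)).map Prod.snd

def pvSheep (info : List Int) (S : Finset Int) : Int :=
  ((S.filter (fun v => pvInfoAt info v = 0)).card : Int)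

def pvWolf (info : List Int) (S : Finset Int) : Int :=
  ((S.filter (fun v => ¬ pvInfoAt info v = 0)).card : Int)

def pvSafe (info : List Int) (S : Finset Int) : Prop := pvWolf info S < pvSheep info S

def pvNbr (edges : List (Int × Int)) (S : Finset Int) (c : Int) : Prop :=
  (∃ v ∈ S, c ∈ pvChildList edges v) ∧ c ∉ S

inductive pvReach (info : List Int) (edges : List (Int × Int)) :
    Finset Int → Nat → Finset Int → Prop
  | refl (S : Finset Int) (h : pvSafe info S) : pvReach info edges S 0 S
  | cons (S : Finset Int) (c : Int) (k : Nat) (T : Finset Int) (h : pvSafe info S)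
      (hc : pvNbr edges S c) (hrest : pvReach info edges (insert c S) k T) :
      pvReach info edges S (k + 1) T

theorem pvSheep_insert (info : List Int) {S : Finset Int} {c : Int} (hc : c ∉ S) :
    pvSheep info (insert c S) =
      if pvInfoAt info c = 0 then pvSheep info S + 1 else pvSheep info S := by
  unfold pvSheep
  rw [Finset.filter_insert]
  split_ifs with h
  · rw [Finset.card_insert_of_notMem (fun hmem => hc (Finset.mem_of_mem_filter _ hmem))]
    push_cast; ring
  · rfl

theorem pvWolf_insert (info : List Int) {S : Finset Int} {c : Int} (hc : c ∉ S) :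
    pvWolf info (insert c S) =
      if pvInfoAt info c = 0 then pvWolf info S else pvWolf info S + 1 := by
  unfold pvWolf
  rw [Finset.filter_insert]
  by_cases h : pvInfoAt info c = 0
  · rw [if_neg (not_not_intro h), if_pos h]
  · rw [if_pos h, if_neg h,
      Finset.card_insert_of_notMem (fun hmem => hc (Finset.mem_of_mem_filter _ hmem))]
    push_cast; ring

theorem pvSheep_erase (info : List Int) {S : Finset Int} {c : Int} (hc : c ∈ S) :
    pvSheep info S =
      if pvInfoAt info c = 0 then pvSheep info (S.erase c) + 1 else pvSheep info (S.erase c) := by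
  conv_lhs => rw [← Finset.insert_erase hc]
  exact pvSheep_insert info (Finset.notMem_erase c S)

theorem pvWolf_erase (info : List Int) {S : Finset Int} {c : Int} (hc : c ∈ S) :
    pvWolf info S =
      if pvInfoAt info c = 0 then pvWolf info (S.erase c) else pvWolf info (S.erase c) + 1 := by
  conv_lhs => rw [← Finset.insert_erase hc]
  exact pvWolf_insert info (Finset.notMem_erase c S)

-- reach facts
theorem pvReach_safe {info edges} {S : Finset Int} {k : Nat} {T : Finset Int}
    (h : pvReach info edges S k T) : pvSafe info T := by
  induction h with
  | refl S h => exact h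
  | cons S c k T h hc hrest ih => exact ih

theorem pvReach_subset {info edges} {S : Finset Int} {k : Nat} {T : Finset Int}
    (h : pvReach info edges S k T) : S ⊆ T := by
  induction h with
  | refl S h => exact Finset.Subset.refl _
  | cons S c k T h hc hrest ih => exact fun x hx => ih (Finset.mem_insert_of_mem hx)

theorem pvReach_card {info edges} {S : Finset Int} {k : Nat} {T : Finset Int}
    (h : pvReach info edges S k T) : T.card = S.card + k := by
  induction h with
  | refl S h => rfl
  | cons S c k T h hc hrest ih =>
    rw [ih, Finset.card_insert_of_notMem hc.2]; omega

theorem pvReach_zero {info edges} {S T : Finset Int}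
    (h : pvReach info edges S 0 T) : T = S := by
  cases h; rfl

theorem pvReach_snoc {info edges} {S : Finset Int} {k : Nat} {T : Finset Int}
    (h : pvReach info edges S k T) {c : Int} (hc : pvNbr edges T c)
    (hsafe : pvSafe info (insert c T)) : pvReach info edges S (k + 1) (insert c T) := by
  induction h with
  | refl S h => exact pvReach.cons S c 0 _ h hc (pvReach.refl _ hsafe)
  | cons S c0 k T h hc0 hrest ih => exact pvReach.cons S c0 (k+1) _ h hc0 (ih hc hsafe)

theorem pvReach_snoc_inv {info edges} {S : Finset Int} {k : Nat} {T' : Finset Int}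
    (h : pvReach info edges S (k + 1) T') :
    ∃ T c, pvReach info edges S k T ∧ pvNbr edges T c ∧ T' = insert c T := by
  induction k generalizing S with
  | zero =>
    cases h with
    | cons S c k T hsafe hc hrest =>
      have := pvReach_zero hrest
      exact ⟨S, c, pvReach.refl S hsafe, hc, this.symm ▸ rfl⟩
  | succ k ih =>
    cases h with
    | cons S c0 k' T hsafe hc0 hrest =>
      obtain ⟨T, c, hr, hn, he⟩ := ih hrest
      exact ⟨T, c, pvReach.cons S c0 k T hsafe hc0 hr, hn, he⟩

theorem pvChildList_mem {edges : List (Int × Int)} {v c : Int} :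
    c ∈ pvChildList edges v ↔ ∃ pc ∈ edges, pc.1 = v ∧ pc.2 = c := by
  simp only [pvChildList, List.mem_map, List.mem_filter, beq_iff_eq]
  constructor
  · rintro ⟨pc, ⟨hm, he⟩, rfl⟩; exact ⟨pc, hm, he, rfl⟩
  · rintro ⟨pc, hm, he, rfl⟩; exact ⟨pc, ⟨hm, he⟩, rfl⟩

theorem pvReach_subset_union {info edges} {S : Finset Int} {k : Nat} {T : Finset Int}
    (h : pvReach info edges S k T) : T ⊆ S ∪ (edges.map Prod.snd).toFinset := by
  induction h with
  | refl S h => exact Finset.subset_union_left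
  | cons S c k T h hc hrest ih =>
    intro x hx
    rcases Finset.mem_union.mp (ih hx) with h1 | h1
    · rcases Finset.mem_insert.mp h1 with rfl | h2
      · obtain ⟨v, _, hcl⟩ := hc.1
        obtain ⟨pc, hm, _, rfl⟩ := pvChildList_mem.mp hcl
        exact Finset.mem_union_right _ (List.mem_toFinset.mpr (List.mem_map.mpr ⟨pc, hm, rfl⟩))
      · exact Finset.mem_union_left _ h2
    · exact Finset.mem_union_right _ h1

theorem pvReach_le_edges {info : List Int} {edges : List (Int × Int)} {k : Nat} {T : Finset Int}
    (h : pvReach info edges {0} k T) : k ≤ edges.length := by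
  have hcard : T.card = 1 + k := by rw [pvReach_card h]; rfl
  have h0 : (0 : Int) ∈ T := pvReach_subset h (Finset.mem_singleton_self 0)
  have hsub : T.erase 0 ⊆ (edges.map Prod.snd).toFinset := by
    intro x hx
    have hne := Finset.ne_of_mem_erase hx
    have hxT := Finset.mem_of_mem_erase hx
    rcases Finset.mem_union.mp (pvReach_subset_union h hxT) with h1 | h1
    · exact absurd (Finset.mem_singleton.mp h1) hne
    · exact h1
  have h1 : (T.erase 0).card = k := by
    have := Finset.card_erase_of_mem h0; omega
  have h2 : (T.erase 0).card ≤ (edges.map Prod.snd).toFinset.card := Finset.card_le_card hsub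
  have h3 : (edges.map Prod.snd).toFinset.card ≤ edges.length := by
    calc (edges.map Prod.snd).toFinset.card ≤ (edges.map Prod.snd).length :=
          List.toFinset_card_le _
      _ = edges.length := List.length_map ..
  omega

theorem pvReach_subset_Ico {info : List Int} {edges : List (Int × Int)}
    (hpre : ∀ pc ∈ edges, 0 ≤ pc.1 ∧ pc.1 < info.length ∧ 0 ≤ pc.2 ∧ pc.2 < info.length)
    {S : Finset Int} {k : Nat} {T : Finset Int} (h : pvReach info edges S k T)
    (hS : S ⊆ Finset.Ico 0 (info.length : Int)) : T ⊆ Finset.Ico 0 (info.length : Int) := by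
  induction h with
  | refl S h => exact hS
  | cons S c k T h hc hrest ih =>
    refine ih (Finset.insert_subset ?_ hS)
    obtain ⟨v, _, hcl⟩ := hc.1
    obtain ⟨pc, hm, _, rfl⟩ := pvChildList_mem.mp hcl
    have := hpre pc hm
    exact Finset.mem_Ico.mpr ⟨this.2.2.1, this.2.2.2⟩

theorem pvReach_lt_n {info : List Int} {edges : List (Int × Int)}
    (hpre : ∀ pc ∈ edges, 0 ≤ pc.1 ∧ pc.1 < info.length ∧ 0 ≤ pc.2 ∧ pc.2 < info.length)
    (hne : info ≠ []) {k : Nat} {T : Finset Int}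
    (h : pvReach info edges {0} k T) : k + 1 ≤ info.length := by
  have hn : 0 < info.length := List.length_pos_iff.mpr hne
  have hS : ({0} : Finset Int) ⊆ Finset.Ico 0 (info.length : Int) := by
    intro x hx
    rw [Finset.mem_singleton.mp hx]
    exact Finset.mem_Ico.mpr ⟨le_refl _, by exact_mod_cast hn⟩
  have hsub := pvReach_subset_Ico hpre h hS
  have h1 : T.card ≤ (Finset.Ico (0:Int) (info.length : Int)).card := Finset.card_le_card hsub
  rw [Int.card_Ico] at h1
  have h2 : T.card = 1 + k := by rw [pvReach_card h]; rfl
  omega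

-- dict builds
theorem pvSeed_getD (l : List Int) (d : PySem.Dict Int (List Int))
    (h : ∀ u, d.getD u [] = ([] : List Int)) :
    ∀ v, (l.foldl (fun d idx => d.insert idx ([] : List Int)) d).getD v [] = [] := by
  induction l generalizing d with
  | nil => exact h
  | cons x t ih =>
    intro v
    refine ih _ (fun u => ?_) v
    rw [PySem.Dict.getD_insert]
    split_ifs <;> simp [h]

theorem pvBuild_getD (edges : List (Int × Int)) (d : PySem.Dict Int (List Int))
    (h : ∀ u, d.getD u [] = ([] : List Int)) (v : Int) :
    (edges.foldl (fun d pc => d.modify pc.1 [] (· ++ [pc.2])) d).getD v [] =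
      pvChildList edges v := by
  rw [PySem.Dict.getD_foldl_modify_append, h]
  rfl

-- set representation bridges
theorem pvInsort_toFinset (c : Int) (st : List Int) :
    (pvInsort c st).toFinset = insert c st.toFinset := by
  induction st with
  | nil => rfl
  | cons v rest ih =>
    unfold pvInsort
    split_ifs
    · simp
    · simp only [List.toFinset_cons, ih, Finset.insert_comm]

theorem pvAdd_toFinset (V : PySem.Set Int) (c : Int) :
    (PySem.Set.add V c).toFinset = insert c V.toFinset := by
  by_cases h : c ∈ V
  · rw [PySem.Set.add_of_mem h]
    exact (Finset.insert_eq_self.mpr (List.mem_toFinset.mpr h)).symm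
  · rw [PySem.Set.add_of_not_mem h]
    ext x
    simp [Finset.mem_insert]

theorem pvContains_false {V : PySem.Set Int} {c : Int} (h : c ∉ V) :
    PySem.Set.contains V c = false := by
  by_cases h1 : PySem.Set.contains V c = true
  · exact absurd ((PySem.Set.contains_iff V c).mp h1) h
  · exact eq_false_of_ne_true h1

theorem pvDfs_ge (info : List Int) (edges : List (Int × Int)) (tree : PySem.Dict Int (List Int))
    (htree : ∀ v, pvTreeGet tree v = pvChildList edges v)
    {S : Finset Int} {k : Nat} {T : Finset Int} (h : pvReach info edges S k T) :
    ∀ (fuel : Nat) (c : Int) (V : PySem.Set Int) (s w : Int), k < fuel →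
      V.toFinset = S → c ∈ S → s = pvSheep info (S.erase c) → w = pvWolf info (S.erase c) →
      pvSheep info T ≤ pvDfs tree info fuel c V s w := by
  have hinfl : ∀ (V : PySem.Set Int) (g : Int → Int) (b c' : Int),
      b ≤ if V.contains c' = true then b else max b (g c') := by
    intro V g b c'
    split_ifs
    · exact le_refl b
    · exact le_max_left _ _
  induction h with
  | refl S hsafe =>
    intro fuel c V s w hfuel hV hc hs hw
    obtain ⟨f, rfl⟩ : ∃ f, fuel = f + 1 := ⟨fuel - 1, by omega⟩
    have hs' : (if pvInfoAt info c = 0 then s + 1 else s) = pvSheep info S := by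
      rw [hs]; exact (pvSheep_erase info hc).symm
    have hw' : (if pvInfoAt info c = 0 then w else w + 1) = pvWolf info S := by
      rw [hw]; exact (pvWolf_erase info hc).symm
    simp only [pvDfs]
    rw [hs', hw', if_neg (not_le.mpr hsafe)]
    exact pvFoldInfl (fun a v => pvFoldInfl (fun b c' => hinfl V
      (fun x => pvDfs tree info f x (PySem.Set.add V x) (pvSheep info S) (pvWolf info S)) b c')
      (pvTreeGet tree v) a) V (pvSheep info S)
  | cons S c0 k T hsafe hc hrest ih =>
    intro fuel c V s w hfuel hV hc' hs hw
    obtain ⟨f, rfl⟩ : ∃ f, fuel = f + 1 := ⟨fuel - 1, by omega⟩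
    have hs' : (if pvInfoAt info c = 0 then s + 1 else s) = pvSheep info S := by
      rw [hs]; exact (pvSheep_erase info hc').symm
    have hw' : (if pvInfoAt info c = 0 then w else w + 1) = pvWolf info S := by
      rw [hw]; exact (pvWolf_erase info hc').symm
    simp only [pvDfs]
    rw [hs', hw', if_neg (not_le.mpr hsafe)]
    obtain ⟨v, hvS, hcl⟩ := hc.1
    have hvV : v ∈ V := List.mem_toFinset.mp (hV ▸ hvS)
    refine pvFoldReach (fun a x => pvFoldInfl (fun b c' => hinfl V
        (fun y => pvDfs tree info f y (PySem.Set.add V y) (pvSheep info S) (pvWolf info S)) b c')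
        (pvTreeGet tree x) a) hvV
      (fun a => ?_) (pvSheep info S)
    rw [htree v]
    refine pvFoldReach (fun b c' => hinfl V
      (fun y => pvDfs tree info f y (PySem.Set.add V y) (pvSheep info S) (pvWolf info S)) b c')
      hcl (fun b => ?_) a
    have hc0V : c0 ∉ V := fun hm => hc.2 (hV ▸ List.mem_toFinset.mpr hm)
    rw [pvContains_false hc0V]
    simp only [Bool.false_eq_true, if_false]
    refine le_trans (ih f c0 (PySem.Set.add V c0) _ _ (by omega) ?_ ?_ ?_ ?_) (le_max_right _ _)
    · rw [pvAdd_toFinset, hV]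
    · exact Finset.mem_insert_self _ _
    · rw [Finset.erase_insert hc.2]
    · rw [Finset.erase_insert hc.2]

theorem pvDfs_cases (info : List Int) (edges : List (Int × Int))
    (tree : PySem.Dict Int (List Int))
    (htree : ∀ v, pvTreeGet tree v = pvChildList edges v) :
    ∀ (fuel : Nat) (c : Int) (V : PySem.Set Int) (s w : Int) (S : Finset Int),
      V.toFinset = S → c ∈ S → s = pvSheep info (S.erase c) → w = pvWolf info (S.erase c) →
      pvDfs tree info fuel c V s w = 0 ∨
        ∃ k T, pvReach info edges S k T ∧ pvDfs tree info fuel c V s w = pvSheep info T := by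
  intro fuel
  induction fuel with
  | zero => intro c V s w S _ _ _ _; left; rfl
  | succ f ihf =>
    intro c V s w S hV hc hs hw
    have hs' : (if pvInfoAt info c = 0 then s + 1 else s) = pvSheep info S := by
      rw [hs]; exact (pvSheep_erase info hc).symm
    have hw' : (if pvInfoAt info c = 0 then w else w + 1) = pvWolf info S := by
      rw [hw]; exact (pvWolf_erase info hc).symm
    simp only [pvDfs]
    rw [hs', hw']
    by_cases hsafe : pvSheep info S ≤ pvWolf info S
    · left; rw [if_pos hsafe]
    · rw [if_neg hsafe]
      have hsafeS : pvSafe info S := not_le.mp hsafe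
      have hstep : ∀ (a : Int) (v : Int),
          ((pvTreeGet tree v).foldl (fun answer c' =>
            if V.contains c' then answer
            else max answer (pvDfs tree info f c' (PySem.Set.add V c')
              (pvSheep info S) (pvWolf info S))) a = a) ∨
          ∃ c' ∈ pvChildList edges v, V.contains c' = false ∧
            (pvTreeGet tree v).foldl (fun answer c' =>
              if V.contains c' then answer
              else max answer (pvDfs tree info f c' (PySem.Set.add V c')
                (pvSheep info S) (pvWolf info S))) a =
              pvDfs tree info f c' (PySem.Set.add V c') (pvSheep info S) (pvWolf info S) := by
        intro a v
        rw [htree v]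
        refine pvFoldCases
          (W := fun c' r => V.contains c' = false ∧
            r = pvDfs tree info f c' (PySem.Set.add V c') (pvSheep info S) (pvWolf info S))
          (fun b c' => ?_) (pvChildList edges v) a
        by_cases hcon : V.contains c' = true
        · left; rw [if_pos hcon]
        · rcases max_choice b (pvDfs tree info f c' (PySem.Set.add V c')
            (pvSheep info S) (pvWolf info S)) with hm | hm
          · left; rw [if_neg hcon]; exact hm
          · right; exact ⟨eq_false_of_ne_true hcon, by rw [if_neg hcon]; exact hm⟩
      rcases pvFoldCases
          (W := fun v r => ∃ c' ∈ pvChildList edges v, V.contains c' = false ∧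
            r = pvDfs tree info f c' (PySem.Set.add V c') (pvSheep info S) (pvWolf info S))
          hstep V (pvSheep info S) with h1 | ⟨v, hvV, c', hcl, hcf, hr⟩
      · right
        exact ⟨0, S, pvReach.refl S hsafeS, h1⟩
      · have hc'V : c' ∉ V := fun hin => by
          rw [(PySem.Set.contains_iff V c').mpr hin] at hcf; cases hcf
        have hc'S : c' ∉ S := fun hm => hc'V (List.mem_toFinset.mp (hV ▸ hm))
        have hvS : v ∈ S := hV ▸ List.mem_toFinset.mpr hvV
        rcases ihf c' (PySem.Set.add V c') (pvSheep info S) (pvWolf info S) (insert c' S)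
            (by rw [pvAdd_toFinset, hV]) (Finset.mem_insert_self _ _)
            (by rw [Finset.erase_insert hc'S]) (by rw [Finset.erase_insert hc'S])
            with h0 | ⟨k, T, hreach, hval⟩
        · left; rw [hr]; exact h0
        · right
          exact ⟨k + 1, T,
            pvReach.cons S c' k T hsafeS ⟨⟨v, hvS, hcl⟩, hc'S⟩ hreach, hr.trans hval⟩

def pvGoodPair (info : List Int) (edges : List (Int × Int)) (m : Nat)
    (p : List Int × (Int × Int)) : Prop :=
  ∃ T, pvReach info edges {0} m T ∧ p.1.toFinset = T ∧
    p.2.1 = pvSheep info T ∧ p.2.2 = pvWolf info T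

def pvInv (info : List Int) (edges : List (Int × Int)) (i : Nat)
    (acc : Int × PySem.Dict (List Int) (Int × Int)) : Prop :=
  (∀ p ∈ acc.2.items, pvGoodPair info edges i p) ∧
  (∀ T, pvReach info edges {0} i T → ∃ p ∈ acc.2.items, p.1.toFinset = T) ∧
  (∀ j T, j ≤ i → pvReach info edges {0} j T → pvSheep info T ≤ acc.1) ∧
  (∃ j T, j ≤ i ∧ pvReach info edges {0} j T ∧ acc.1 = pvSheep info T)

theorem pvIns_pres_mem (info : List Int) (st : List Int) (s w : Int)
    (b : Int × PySem.Dict (List Int) (Int × Int)) (c : Int)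
    {p : List Int × (Int × Int)} (hp : p ∈ b.2.items) :
    p ∈ (pvIns info st s w b c).2.items := by
  simp only [pvIns]
  by_cases h1 : st.contains c = true
  · rw [if_pos h1]; exact hp
  · rw [if_neg h1]
    by_cases h2 : b.2.contains (pvInsort c st) = true
    · rw [if_pos h2]; exact hp
    · rw [if_neg h2]
      by_cases h3 : (if pvInfoAt info c = 0 then w else w + 1)
          < (if pvInfoAt info c = 0 then s + 1 else s)
      · rw [if_pos h3]
        have hns : p.1 ≠ pvInsort c st := fun he =>
          h2 ((PySem.Dict.contains_iff_mem_keys b.2 (pvInsort c st)).mpr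
            (he ▸ PySem.Dict.mem_keys_of_mem_items b.2 hp))
        exact (PySem.Dict.mem_items_insert b.2 _ _ p).mpr (Or.inr ⟨hp, hns⟩)
      · rw [if_neg h3]; exact hp

theorem pvStep_inv (info : List Int) (edges : List (Int × Int))
    (children : PySem.Dict Int (List Int))
    (hch : ∀ v, children.getD v [] = pvChildList edges v)
    (i : Nat) (acc : Int × PySem.Dict (List Int) (Int × Int))
    (hinv : pvInv info edges i acc) : pvInv info edges (i + 1) (pvStep info children acc) := by
  obtain ⟨hsound, hcompl, hdom, hach⟩ := hinv
  set Q : Int × PySem.Dict (List Int) (Int × Int) → Prop := fun b =>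
    (∀ p ∈ b.2.items, pvGoodPair info edges (i + 1) p) ∧
    (∀ p ∈ b.2.items, p.2.1 ≤ b.1) ∧ (acc.1 ≤ b.1) ∧
    (∃ j T, j ≤ i + 1 ∧ pvReach info edges {0} j T ∧ b.1 = pvSheep info T) with hQ
  -- Q is preserved by every inner update
  have hQins : ∀ (item : List Int × (Int × Int)), item ∈ acc.2.items → ∀ (v : Int), v ∈ item.1 →
      ∀ b c, c ∈ children.getD v [] → Q b → Q (pvIns info item.1 item.2.1 item.2.2 b c) := by
    intro item hitem v hv b c hcmem hQb
    obtain ⟨hQ1, hQ2, hQ3, hQ4⟩ := hQb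
    obtain ⟨T, hTreach, hTfin, hTs, hTw⟩ := hsound item hitem
    simp only [pvIns]
    by_cases h1 : item.1.contains c = true
    · rw [if_pos h1]; exact ⟨hQ1, hQ2, hQ3, hQ4⟩
    rw [if_neg h1]
    by_cases h2 : b.2.contains (pvInsort c item.1) = true
    · rw [if_pos h2]; exact ⟨hQ1, hQ2, hQ3, hQ4⟩
    rw [if_neg h2]
    by_cases h3 : (if pvInfoAt info c = 0 then item.2.2 else item.2.2 + 1)
        < (if pvInfoAt info c = 0 then item.2.1 + 1 else item.2.1)
    case neg => rw [if_neg h3]; exact ⟨hQ1, hQ2, hQ3, hQ4⟩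
    rw [if_pos h3]
    · -- the insert branch
      have hcT : c ∉ T := by
        intro hm
        apply h1
        apply List.contains_iff_mem.mpr
        apply List.mem_toFinset.mp
        rw [hTfin]; exact hm
      have hvT : v ∈ T := by rw [← hTfin]; exact List.mem_toFinset.mpr hv
      have hnbr : pvNbr edges T c := ⟨⟨v, hvT, by rw [← hch v]; exact hcmem⟩, hcT⟩
      have hs' : (if pvInfoAt info c = 0 then item.2.1 + 1 else item.2.1)
          = pvSheep info (insert c T) := by
        rw [pvSheep_insert info hcT, hTs]
      have hw' : (if pvInfoAt info c = 0 then item.2.2 else item.2.2 + 1)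
          = pvWolf info (insert c T) := by
        rw [pvWolf_insert info hcT, hTw]
      have hsafe : pvSafe info (insert c T) := by
        unfold pvSafe; rw [← hs', ← hw']; exact h3
      have hreach' : pvReach info edges {0} (i + 1) (insert c T) :=
        pvReach_snoc hTreach hnbr hsafe
      refine ⟨?_, ?_, le_trans hQ3 (le_max_left _ _), ?_⟩
      · intro p hp
        rcases (PySem.Dict.mem_items_insert b.2 _ _ p).mp hp with rfl | ⟨hp', _⟩
        · exact ⟨insert c T, hreach', by rw [pvInsort_toFinset, hTfin], hs', hw'⟩
        · exact hQ1 p hp'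
      · intro p hp
        rcases (PySem.Dict.mem_items_insert b.2 _ _ p).mp hp with rfl | ⟨hp', _⟩
        · exact le_max_right _ _
        · exact le_trans (hQ2 p hp') (le_max_left _ _)
      · rcases max_choice b.1 (if pvInfoAt info c = 0 then item.2.1 + 1 else item.2.1)
            with hm | hm
        · obtain ⟨j, T0, hj, hr, he⟩ := hQ4
          exact ⟨j, T0, hj, hr, by rw [hm, he]⟩
        · exact ⟨i + 1, insert c T, le_refl _, hreach', by rw [hm, hs']⟩
  have hQstep : Q (pvStep info children acc) := by
    unfold pvStep
    refine pvFoldPres (fun b item hitem hQb => ?_) _ ?_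
    · exact pvFoldPres (fun b v hv hQb' =>
        pvFoldPres (fun b c hc hQb'' => hQins item hitem v hv b c hc hQb'') b hQb') b hQb
    · refine ⟨?_, ?_, le_refl _, ?_⟩
      · intro p hp; simp [PySem.Dict.empty] at hp
      · intro p hp; simp [PySem.Dict.empty] at hp
      · obtain ⟨j, T0, hj, hr, he⟩ := hach
        exact ⟨j, T0, le_trans hj (Nat.le_succ i), hr, he⟩
  -- completeness for level i+1
  have hcompl' : ∀ T', pvReach info edges {0} (i + 1) T' →
      ∃ p ∈ (pvStep info children acc).2.items, p.1.toFinset = T' := by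
    intro T' hreach'
    obtain ⟨T, c, hreach, hnbr, rfl⟩ := pvReach_snoc_inv hreach'
    obtain ⟨item, hitem, hfin⟩ := hcompl T hreach
    obtain ⟨v, hvT, hcl⟩ := hnbr.1
    set P : Int × PySem.Dict (List Int) (Int × Int) → Prop := fun b =>
      ∃ p ∈ b.2.items, p.1.toFinset = insert c T with hP
    have hPpres : ∀ (st : List Int) (s w : Int) (b : Int × PySem.Dict (List Int) (Int × Int))
        (c' : Int), P b → P (pvIns info st s w b c') := by
      rintro st s w b c' ⟨p, hp, hpf⟩
      exact ⟨p, pvIns_pres_mem info st s w b c' hp, hpf⟩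
    have hvst : v ∈ item.1 := List.mem_toFinset.mp (by rw [hfin]; exact hvT)
    have hcch : c ∈ children.getD v [] := by rw [hch v]; exact hcl
    obtain ⟨T2, hT2reach, hT2fin, hT2s0, hT2w0⟩ := hsound item hitem
    have hTT2 : T2 = T := by rw [← hT2fin, hfin]
    have hT2s : item.2.1 = pvSheep info T := by rw [hT2s0, hTT2]
    have hT2w : item.2.2 = pvWolf info T := by rw [hT2w0, hTT2]
    have hest : ∀ b, P (pvIns info item.1 item.2.1 item.2.2 b c) := by
      intro b
      simp only [pvIns]
      have h1 : ¬ item.1.contains c = true := fun h =>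
        hnbr.2 (by rw [← hfin]; exact List.mem_toFinset.mpr (List.contains_iff_mem.mp h))
      rw [if_neg h1]
      by_cases h2 : b.2.contains (pvInsort c item.1) = true
      · rw [if_pos h2]
        obtain ⟨p, hp, hpk⟩ := List.mem_map.mp ((PySem.Dict.contains_iff_mem_keys b.2 _).mp h2)
        exact ⟨p, hp, by rw [hpk, pvInsort_toFinset, hfin]⟩
      · rw [if_neg h2]
        have hcT : c ∉ T := hnbr.2
        have hs' : (if pvInfoAt info c = 0 then item.2.1 + 1 else item.2.1)
            = pvSheep info (insert c T) := by rw [pvSheep_insert info hcT, hT2s]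
        have hw' : (if pvInfoAt info c = 0 then item.2.2 else item.2.2 + 1)
            = pvWolf info (insert c T) := by rw [pvWolf_insert info hcT, hT2w]
        have hsafe : pvSafe info (insert c T) := pvReach_safe hreach'
        have h3 : (if pvInfoAt info c = 0 then item.2.2 else item.2.2 + 1)
            < (if pvInfoAt info c = 0 then item.2.1 + 1 else item.2.1) := by
          rw [hs', hw']; exact hsafe
        rw [if_pos h3]
        exact ⟨(pvInsort c item.1, _), PySem.Dict.mem_items_insert_self b.2 _ _,
          by rw [pvInsort_toFinset, hfin]⟩
    have hPfinal : P (pvStep info children acc) := by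
      unfold pvStep
      exact pvFoldEst
        (step := fun b item' => item'.1.foldl (fun b v' =>
          (children.getD v' []).foldl (pvIns info item'.1 item'.2.1 item'.2.2) b) b)
        (fun b item' hitem' hPb => pvFoldPres (fun b v' hv' hPb' =>
          pvFoldPres (fun b c' hc' hPb'' => hPpres item'.1 item'.2.1 item'.2.2 b c' hPb'') b hPb') b hPb)
        hitem
        (fun b => pvFoldEst
          (step := fun b v' => (children.getD v' []).foldl (pvIns info item.1 item.2.1 item.2.2) b)
          (fun b v' hv' hPb => pvFoldPres (fun b c' hc' hPb' =>
            hPpres item.1 item.2.1 item.2.2 b c' hPb') b hPb)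
          hvst
          (fun b => pvFoldEst
            (step := pvIns info item.1 item.2.1 item.2.2)
            (fun b c' hc' hPb => hPpres item.1 item.2.1 item.2.2 b c' hPb)
            hcch hest b) b) (acc.1, PySem.Dict.empty)
    exact hPfinal
  obtain ⟨hQ1, hQ2, hQ3, hQ4⟩ := hQstep
  refine ⟨hQ1, hcompl', ?_, hQ4⟩
  intro j T hj hr
  rcases Nat.lt_or_ge j (i + 1) with hlt | hge
  · exact le_trans (hdom j T (by omega) hr) hQ3
  · have hji : j = i + 1 := by omega
    subst hji
    obtain ⟨p, hp, hpf⟩ := hcompl' T hr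
    obtain ⟨T2, _, hpf2, hps, _⟩ := hQ1 p hp
    have : T2 = T := by rw [← hpf2, hpf]
    subst this
    exact hps ▸ hQ2 p hp

theorem pvIter_inv (info : List Int) (edges : List (Int × Int))
    (children : PySem.Dict Int (List Int))
    (hch : ∀ v, children.getD v [] = pvChildList edges v) :
    ∀ (l : List Int) (i : Nat) (acc : Int × PySem.Dict (List Int) (Int × Int)),
      pvInv info edges i acc →
      pvInv info edges (i + l.length) (l.foldl (fun a _ => pvStep info children a) acc) := by
  intro l
  induction l with
  | nil => intro i acc h; simpa using h
  | cons x t ih =>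
    intro i acc h
    have h2 := ih (i + 1) (pvStep info children acc) (pvStep_inv info edges children hch i acc h)
    simp only [List.foldl_cons, List.length_cons]
    have he : i + (t.length + 1) = (i + 1) + t.length := by omega
    rw [he]
    exact h2

theorem pvInit_inv (info : List Int) (edges : List (Int × Int)) (h0 : pvInfoAt info 0 = 0) :
    pvInv info edges 0 (1, PySem.Dict.empty.insert [0] (1, 0)) := by
  have hitems : ((PySem.Dict.empty : PySem.Dict (List Int) (Int × Int)).insert [0] (1, 0)).items
      = [([0], (1, 0))] := rfl
  have hfin : ([0] : List Int).toFinset = ({0} : Finset Int) := by decide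
  have hs0 : pvSheep info {0} = 1 := by
    simp [pvSheep, Finset.filter_singleton, h0]
  have hw0 : pvWolf info {0} = 0 := by
    simp [pvWolf, Finset.filter_singleton, h0]
  have hsafe : pvSafe info {0} := by unfold pvSafe; rw [hs0, hw0]; norm_num
  refine ⟨?_, ?_, ?_, ?_⟩
  · intro p hp
    rw [hitems] at hp
    rcases List.mem_singleton.mp hp with rfl
    exact ⟨{0}, pvReach.refl _ hsafe, hfin, hs0.symm, hw0.symm⟩
  · intro T hT
    rw [pvReach_zero hT]
    exact ⟨([0], (1, 0)), by rw [hitems]; exact List.mem_singleton_self _, hfin⟩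
  · intro j T hj hr
    have hj0 : j = 0 := Nat.le_zero.mp hj
    subst hj0
    rw [pvReach_zero hr, hs0]
  · exact ⟨0, {0}, le_refl _, pvReach.refl _ hsafe, hs0.symm⟩

theorem pvMain (info : List Int) (edges : List (Int × Int))
    (hne : info ≠ [])
    (hbound : ∀ pc ∈ edges, 0 ≤ pc.1 ∧ pc.1 < info.length ∧ 0 ≤ pc.2 ∧ pc.2 < info.length) :
    pvDfs (edges.foldl (fun d pc => d.modify pc.1 [] (· ++ [pc.2]))
        ((PySem.List.pyRange 0 (PySem.List.len info) 1).foldl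
          (fun d idx => d.insert idx ([] : List Int)) PySem.Dict.empty))
      info (edges.length + 1) 0 (PySem.Set.ofList [0]) 0 0 =
    (if pvInfoAt info 0 ≠ 0 then 0
     else ((PySem.List.pyRange 1 (PySem.List.len info) 1).foldl
        (fun acc _ => pvStep info
          (edges.foldl (fun d pc => d.modify pc.1 [] (· ++ [pc.2]))
            ((PySem.List.pyRange 0 (PySem.List.len info) 1).foldl
              (fun d idx => d.insert idx ([] : List Int)) PySem.Dict.empty)) acc)
        (1, PySem.Dict.empty.insert [0] (1, 0))).1) := by
  have htree0 : ∀ u, (((PySem.List.pyRange 0 (PySem.List.len info) 1).foldl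
      (fun d idx => d.insert idx ([] : List Int)) PySem.Dict.empty)).getD u [] = [] := by
    refine pvSeed_getD _ _ (fun u => ?_)
    rfl
  have htree : ∀ v, pvTreeGet (edges.foldl (fun d pc => d.modify pc.1 [] (· ++ [pc.2]))
      ((PySem.List.pyRange 0 (PySem.List.len info) 1).foldl
        (fun d idx => d.insert idx ([] : List Int)) PySem.Dict.empty)) v =
      pvChildList edges v := fun v => pvBuild_getD edges _ htree0 v
  have hch : ∀ v, ((edges.foldl (fun d pc => d.modify pc.1 [] (· ++ [pc.2]))
      ((PySem.List.pyRange 0 (PySem.List.len info) 1).foldl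
        (fun d idx => d.insert idx ([] : List Int)) PySem.Dict.empty))).getD v []
        = pvChildList edges v :=
    fun v => pvBuild_getD edges _ htree0 v
  have hofl : (PySem.Set.ofList [0] : PySem.Set Int) = [0] := rfl
  have hfin : ([0] : List Int).toFinset = ({0} : Finset Int) := by decide
  have hErase : pvSheep info (({0} : Finset Int).erase 0) = 0 ∧
      pvWolf info (({0} : Finset Int).erase 0) = 0 := by
    constructor <;> simp [pvSheep, pvWolf]
  by_cases h0 : pvInfoAt info 0 = 0
  · -- root is a sheep
    rw [if_neg (not_not_intro h0)]
    have hs0 : pvSheep info {0} = 1 := by simp [pvSheep, Finset.filter_singleton, h0]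
    have hsafe0 : pvSafe info ({0} : Finset Int) := by
      unfold pvSafe
      rw [hs0]
      simp [pvWolf, Finset.filter_singleton, h0]
    -- the B-side invariant after all rounds
    have hlen : (PySem.List.pyRange 1 (PySem.List.len info) 1).length = info.length - 1 := by
      rw [PySem.List.len_eq, PySem.List.length_pyRange_one]
      omega
    have hinv := pvIter_inv info edges _ hch (PySem.List.pyRange 1 (PySem.List.len info) 1) 0
      (1, PySem.Dict.empty.insert [0] (1, 0)) (pvInit_inv info edges h0)
    rw [hlen] at hinv
    obtain ⟨hQ1, hQ2, hdom, hach⟩ := hinv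
    -- the A-side value
    have hA := pvDfs_cases info edges _ htree (edges.length + 1) 0 (PySem.Set.ofList [0]) 0 0 {0}
      (by rw [hofl]; exact hfin) (Finset.mem_singleton_self 0) (by rw [hErase.1])
      (by rw [hErase.2])
    have hAge : ∀ (k : Nat) (T : Finset Int), pvReach info edges {0} k T →
        pvSheep info T ≤ pvDfs (edges.foldl (fun d pc => d.modify pc.1 [] (· ++ [pc.2]))
          ((PySem.List.pyRange 0 (PySem.List.len info) 1).foldl
            (fun d idx => d.insert idx ([] : List Int)) PySem.Dict.empty))
          info (edges.length + 1) 0 (PySem.Set.ofList [0]) 0 0 := by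
      intro k T hr
      exact pvDfs_ge info edges _ htree hr (edges.length + 1) 0 (PySem.Set.ofList [0]) 0 0
        (by have := pvReach_le_edges hr; omega)
        (by rw [hofl]; exact hfin) (Finset.mem_singleton_self 0)
        (by rw [hErase.1]) (by rw [hErase.2])
    have hA1 : (1 : Int) ≤ pvDfs (edges.foldl (fun d pc => d.modify pc.1 [] (· ++ [pc.2]))
        ((PySem.List.pyRange 0 (PySem.List.len info) 1).foldl
          (fun d idx => d.insert idx ([] : List Int)) PySem.Dict.empty))
        info (edges.length + 1) 0 (PySem.Set.ofList [0]) 0 0 := by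
      have := hAge 0 {0} (pvReach.refl _ hsafe0)
      rw [hs0] at this
      exact this
    rcases hA with hA0 | ⟨k, T, hreach, hval⟩
    · rw [hA0] at hA1; omega
    · rw [hval]
      refine le_antisymm ?_ ?_
      · -- A ≤ B
        refine hdom k T ?_ hreach
        have hk := pvReach_lt_n hbound hne hreach
        omega
      · -- B ≤ A
        obtain ⟨j, T2, hj, hr2, he2⟩ := hach
        rw [he2]
        rw [← hval]
        exact hAge j T2 hr2
  · -- root is a wolf: both sides are 0
    rw [if_pos h0]
    simp only [pvDfs]
    rw [if_neg h0, if_neg h0]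
    norm_num

-- ===== VERDICT (by name: the statement is the Claim_ definition above) =====
theorem solution_spec : Claim_equal_solution := by
  intro info edges _ hpre
  obtain ⟨hne, hbound⟩ := hpre
  show solution info edges = solution_alt info edges
  exact pvMain info edges hne hbound
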